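-- pv_equiv track=rewrite | github.com/cgq0816/Analysis-docx | analysis_table_1.py | extract_table_1
-- ===== SOURCE A (Python) =====
-- def extract_table_1(textbox):
--     textbox_content = textbox['textboxContent']
--     row_list = []
--     temp_list = []
--     for i in range(len(textbox_content)):
--         temp_list.append(textbox_content[i])
--         if textbox_content[i]['text'] == '\n':
--             row_list.append(temp_list)
--             temp_list = []
--     return row_list
-- ===== SOURCE B (Python) =====
-- def _split_first(content):
--     """Return (row ending at the first '\n' marker, remaining items), or None if no marker."""
--     for j, item in enumerate(content):
--         if item['text'] == '\n':
--             return content[:j + 1], content[j + 1:]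
--     return None
--
--
-- def extract_table_1(textbox):
--     content = textbox['textboxContent']
--     row_list = []
--     while True:
--         res = _split_first(content)
--         if res is None:
--             return row_list
--         row, content = res
--         row_list.append(row)
-- ===== Notes on version B (the rewrite author's own statement) =====
-- stated objective: alternative
-- what changed: A makes one pass accumulating items into a temp list flushed at each newline marker; B instead repeatedly splits off the first row with a helper that finds the first '\n' marker and slices the content there, looping until no marker remains (trailing items after the last marker are dropped, as in A).
import Mathlib
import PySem

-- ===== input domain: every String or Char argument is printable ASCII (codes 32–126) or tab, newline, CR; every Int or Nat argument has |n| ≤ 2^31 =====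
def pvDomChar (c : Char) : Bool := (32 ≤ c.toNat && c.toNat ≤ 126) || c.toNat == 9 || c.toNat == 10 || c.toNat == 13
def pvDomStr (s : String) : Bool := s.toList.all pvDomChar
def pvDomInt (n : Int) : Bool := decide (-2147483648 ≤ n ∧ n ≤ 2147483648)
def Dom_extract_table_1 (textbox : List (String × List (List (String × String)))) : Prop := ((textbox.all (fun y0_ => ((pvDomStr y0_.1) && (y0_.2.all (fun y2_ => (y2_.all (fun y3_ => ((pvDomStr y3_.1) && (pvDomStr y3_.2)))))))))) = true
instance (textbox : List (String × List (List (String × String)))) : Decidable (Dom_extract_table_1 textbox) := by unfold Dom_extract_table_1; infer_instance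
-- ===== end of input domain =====

-- B replaces A's single-pass temp-list accumulation by repeatedly splitting off the first row
-- at the first '\n' marker (helper scan + slices, looped); alternative decomposition, same result.


-- ===== PORT A =====
-- item['text'] == '\n'; under Pre_ the 'text' key is present, so the getD default never fires
def pvIsNl (item : List (String × String)) : Bool :=
  PySem.Dict.getD (PySem.Dict.mk item) "text" "" == "\n"

def extract_table_1 (textbox : List (String × List (List (String × String)))) : List (List (List (String × String))) :=
  match (PySem.Dict.mk textbox).get? "textboxContent" with
  | none => []  -- Python raises KeyError here; excluded by Pre_
  | some content =>
    ((PySem.List.pyRange 0 (PySem.List.len content)).foldl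
      (fun (st : List (List (List (String × String))) × List (List (String × String))) i =>
        if pvIsNl (PySem.List.pyGetD content i []) then (st.1 ++ [st.2 ++ [PySem.List.pyGetD content i []]], [])
        else (st.1, st.2 ++ [PySem.List.pyGetD content i []]))
      ([], [])).1

-- ===== PORT B =====
-- the 'for j, item in enumerate(content)' scan of _split_first: index of the first '\n' marker
def pvFindNl : List (List (String × String)) → Nat → Option Nat
  | [], _ => none
  | c :: cs, j => if pvIsNl c then some j else pvFindNl cs (j + 1)

-- _split_first: (content[:j+1], content[j+1:]) at the first marker index j, or none
def pvSplitFirst (content : List (List (String × String))) :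
    Option (List (List (String × String)) × List (List (String × String))) :=
  match pvFindNl content 0 with
  | none => none
  | some j => some (PySem.List.slice content none (some ((j : Int) + 1)),
                    PySem.List.slice content (some ((j : Int) + 1)) none)

-- termination of the while loop: the remaining content strictly shrinks at each split
lemma pvSplitFirst_length (content row rest : List (List (String × String)))
    (h : pvSplitFirst content = some (row, rest)) : rest.length < content.length := by
  unfold pvSplitFirst at h
  cases hf : pvFindNl content 0 with
  | none => rw [hf] at h; exact absurd h (by simp)
  | some j =>
    rw [hf] at h
    simp only [Option.some.injEq, Prod.mk.injEq] at h
    cases content with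
    | nil => exact absurd hf (by simp [pvFindNl])
    | cons c cs =>
      have hc : ((j : Int) + 1) = (((j + 1 : Nat) : Int)) := by push_cast; ring
      rw [hc, PySem.List.slice_from_natCast] at h
      rw [← h.2]
      simp only [List.length_drop, List.length_cons]
      omega

-- the 'while True' loop of extract_table_1: peel off rows until no marker remains
def pvRowsLoop (content : List (List (String × String)))
    (acc : List (List (List (String × String)))) : List (List (List (String × String))) :=
  match h : pvSplitFirst content with
  | none => acc
  | some (row, rest) => pvRowsLoop rest (acc ++ [row])
termination_by content.length
decreasing_by exact pvSplitFirst_length _ _ _ h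

def extract_table_1_alt (textbox : List (String × List (List (String × String)))) : List (List (List (String × String))) :=
  match (PySem.Dict.mk textbox).get? "textboxContent" with
  | none => []  -- Python raises KeyError here; excluded by Pre_
  | some content => pvRowsLoop content []

-- ===== PRECONDITION & SPEC =====
-- Pre_ excludes exactly the inputs where Python A raises KeyError: a missing 'textboxContent'
-- key, or a content item without a 'text' key (B raises there too).
def Pre_extract_table_1 (textbox : List (String × List (List (String × String)))) : Prop :=
  ((PySem.Dict.mk textbox).get? "textboxContent").isSome = true ∧
  ∀ item ∈ (((PySem.Dict.mk textbox).get? "textboxContent").getD []),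
    ((PySem.Dict.mk item).get? "text").isSome = true
instance (textbox : List (String × List (List (String × String)))) : Decidable (Pre_extract_table_1 textbox) := by unfold Pre_extract_table_1; infer_instance

def pvWitness_extract_table_1 : (List (String × List (List (String × String)))) :=
  [("textboxContent", [[("text", "a")], [("text", "\n")], [("text", "b")]])]

def Spec_extract_table_1 (textbox : List (String × List (List (String × String)))) (out : List (List (List (String × String)))) : Prop := out = extract_table_1_alt textbox
instance (textbox : List (String × List (List (String × String)))) (out : List (List (List (String × String)))) : Decidable (Spec_extract_table_1 textbox out) := by unfold Spec_extract_table_1; infer_instance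

-- ===== CLAIM (what is proved, stated in full; the proofs are below) =====
def Claim_equal_extract_table_1 : Prop := ∀ (textbox : List (String × List (List (String × String)))), Dom_extract_table_1 textbox → Pre_extract_table_1 textbox → Spec_extract_table_1 textbox (extract_table_1 textbox)

-- ===== LEMMAS AND PROOFS =====

-- canonical grouping both ports are proved equal to
def pvRows : List (List (String × String)) → List (List (String × String)) → List (List (List (String × String)))
  | [], _ => []
  | c :: cs, temp => if pvIsNl c then (temp ++ [c]) :: pvRows cs [] else pvRows cs (temp ++ [c])

lemma pvFoldA (cs : List (List (String × String))) :
    ∀ (r : List (List (List (String × String)))) (t : List (List (String × String))),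
    (cs.foldl
      (fun (st : List (List (List (String × String))) × List (List (String × String))) item =>
        if pvIsNl item then (st.1 ++ [st.2 ++ [item]], []) else (st.1, st.2 ++ [item]))
      (r, t)).1 = r ++ pvRows cs t := by
  induction cs with
  | nil => intro r t; simp [pvRows]
  | cons c cs ih =>
    intro r t
    by_cases h : pvIsNl c = true
    · simp [pvRows, h, ih]
    · simp [pvRows, h, ih]

lemma pvFindNl_shift (cs : List (List (String × String))) :
    ∀ k, pvFindNl cs k = (pvFindNl cs 0).map (fun i => i + k) := by
  induction cs with
  | nil => intro k; simp [pvFindNl]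
  | cons c cs ih =>
    intro k
    by_cases h : pvIsNl c = true
    · simp [pvFindNl, h]
    · simp only [pvFindNl, h, if_neg, Bool.false_eq_true, not_false_iff]
      rw [ih (k + 1), ih 1]
      cases pvFindNl cs 0 with
      | none => rfl
      | some j => simp; omega

lemma pvSplitFirst_cons (c : List (String × String)) (cs : List (List (String × String))) :
    pvSplitFirst (c :: cs)
      = if pvIsNl c then some ([c], cs)
        else (pvSplitFirst cs).map (fun p => (c :: p.1, p.2)) := by
  have hcons : pvFindNl (c :: cs) 0 = if pvIsNl c then some 0 else pvFindNl cs 1 := rfl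
  unfold pvSplitFirst
  rw [hcons]
  by_cases h : pvIsNl c = true
  · rw [if_pos h, if_pos h]
    dsimp only
    have h1 : ((0 : Nat) : Int) + 1 = ((1 : Nat) : Int) := by norm_num
    rw [h1, PySem.List.slice_to_natCast, PySem.List.slice_from_natCast]
    simp
  · rw [if_neg h, if_neg h, pvFindNl_shift cs 1]
    cases hf : pvFindNl cs 0 with
    | none => simp
    | some j =>
      simp only [Option.map_some]
      have h1 : ((j + 1 : Nat) : Int) + 1 = (((j + 2 : Nat)) : Int) := by push_cast; ring
      have h2 : ((j : Nat) : Int) + 1 = (((j + 1 : Nat)) : Int) := by push_cast; ring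
      rw [h1, h2, PySem.List.slice_to_natCast, PySem.List.slice_to_natCast,
        PySem.List.slice_from_natCast, PySem.List.slice_from_natCast]
      simp [List.take_succ_cons, List.drop_succ_cons]

lemma pvRows_split (cs : List (List (String × String))) :
    ∀ temp, pvRows cs temp
      = (match pvSplitFirst cs with
         | none => []
         | some (row, rest) => (temp ++ row) :: pvRows rest []) := by
  induction cs with
  | nil => intro temp; simp [pvRows, pvSplitFirst, pvFindNl]
  | cons c cs ih =>
    intro temp
    rw [pvSplitFirst_cons]
    by_cases h : pvIsNl c = true
    · simp [pvRows, h]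
    · simp only [pvRows, h, Bool.false_eq_true, if_false]
      rw [ih (temp ++ [c])]
      cases pvSplitFirst cs with
      | none => rfl
      | some p => simp

lemma pvRowsLoop_eq (content : List (List (String × String))) :
    ∀ acc, pvRowsLoop content acc = acc ++ pvRows content [] := by
  induction hn : content.length using Nat.strong_induction_on generalizing content with
  | _ n ih =>
    intro acc
    rw [pvRowsLoop, pvRows_split]
    cases h : pvSplitFirst content with
    | none => simp
    | some p =>
      obtain ⟨row, rest⟩ := p
      have hlt := pvSplitFirst_length content row rest h
      dsimp only
      rw [ih rest.length (hn ▸ hlt) rest rfl (acc ++ [row])]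
      simp

-- ===== VERDICT (by name: the statement is the Claim_ definition above) =====
theorem extract_table_1_spec : Claim_equal_extract_table_1 := by
  intro textbox _ _
  unfold Spec_extract_table_1 extract_table_1 extract_table_1_alt
  cases hc : (PySem.Dict.mk textbox).get? "textboxContent" with
  | none => rfl
  | some content =>
    dsimp only
    rw [PySem.List.foldl_pyRange_zero_pyGetD content []
      (fun (st : List (List (List (String × String))) × List (List (String × String))) item =>
        if pvIsNl item then (st.1 ++ [st.2 ++ [item]], []) else (st.1, st.2 ++ [item]))
      ([], [])]
    rw [pvFoldA content [] [], pvRowsLoop_eq content []]
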